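-- pv_equiv track=rewrite | github.com/neulab/prompt2model | prompt2model/utils/parse_responses.py | find_rightmost_brackets
-- ===== SOURCE A (Python) =====
-- def find_rightmost_brackets(text: str) -> str | None:
--     """Find the rightmost complete set of brackets in a string."""
--     stack = []
--     for i, char in enumerate(reversed(text)):
--         if char == "}":
--             stack.append(len(text) - i - 1)
--         elif char == "{" and stack:
--             start = len(text) - i - 1
--             end = stack.pop()
--             if not stack:  # Found the rightmost complete set
--                 return text[start : end + 1]
--     return None
-- ===== SOURCE B (Python) =====
-- def find_rightmost_brackets(text: str) -> str | None:
--     """Find the rightmost complete set of brackets in a string."""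
--     opens = []  # positions of currently-unmatched "{"
--     last = None  # match of the most recent "}" seen, or None
--     for i, char in enumerate(text):
--         if char == "{":
--             opens.append(i)
--         elif char == "}":
--             last = (opens.pop(), i) if opens else None
--     if last is None:
--         return None
--     start, end = last
--     return text[start:end + 1]
-- ===== Notes on version B (the rewrite author's own statement) =====
-- stated objective: alternative
-- what changed: B scans the string left-to-right as a standard bracket matcher, stacking positions of unmatched '{' and recording for each '}' its matched pair (or None), then returns the pair recorded for the final '}'; A scans right-to-left stacking '}' positions and returns early when its stack empties.
import Mathlib
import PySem

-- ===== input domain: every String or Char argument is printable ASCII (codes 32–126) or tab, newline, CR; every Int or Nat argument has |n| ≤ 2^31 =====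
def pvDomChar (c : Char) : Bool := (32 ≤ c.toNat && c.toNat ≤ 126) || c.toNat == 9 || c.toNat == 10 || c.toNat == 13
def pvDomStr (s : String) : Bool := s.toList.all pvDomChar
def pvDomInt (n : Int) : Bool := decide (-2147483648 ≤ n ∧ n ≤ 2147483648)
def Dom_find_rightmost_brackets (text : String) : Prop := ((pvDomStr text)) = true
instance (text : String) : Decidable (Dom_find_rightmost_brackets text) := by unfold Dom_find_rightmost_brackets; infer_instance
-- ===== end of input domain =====

-- B replaces A's right-to-left scan (stack of '}' positions, early return) by a left-to-right
-- standard bracket matcher: a stack of unmatched '{' positions plus the match recorded for the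
-- most recent '}'; at the end it slices the pair recorded for the final '}'. Same return value.

-- ===== PORT A =====
-- loop over enumerate(reversed(text)) carrying the stack of '}' indices; early return via Option
def fa_go (s : String) (n : Int) (i : Nat) (rev : List Char) (stack : List Int) : Option String :=
  match rev with
  | [] => none
  | c :: rest =>
    if c = '}' then
      fa_go s n (i + 1) rest ((n - (i : Int) - 1) :: stack)
    else if c = '{' ∧ stack ≠ [] then
      let e := stack.headD 0       -- stack.pop(): the guard ensures stack ≠ []
      let stack' := stack.tail
      if stack' = [] then
        some (PySem.Str.slice s (some (n - (i : Int) - 1)) (some (e + 1)))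
      else fa_go s n (i + 1) rest stack'
    else fa_go s n (i + 1) rest stack

def find_rightmost_brackets (text : String) : Option String :=
  fa_go text (PySem.Str.len text) 0 text.toList.reverse []

-- ===== PORT B =====
-- for i, char in enumerate(text): push '{' positions, on '}' record (opens.pop(), i) or None;
-- the Python list used as a stack (append/pop at the end) is modelled head-first (cons/head)
def fbw_go (i : Nat) (cs : List Char) (opens : List Nat) (last : Option (Nat × Nat)) :
    Option (Nat × Nat) :=
  match cs with
  | [] => last
  | c :: rest =>
    if c = '{' then fbw_go (i + 1) rest (i :: opens) last
    else if c = '}' then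
      match opens with
      | [] => fbw_go (i + 1) rest [] none
      | a :: os => fbw_go (i + 1) rest os (some (a, i))
    else fbw_go (i + 1) rest opens last

def find_rightmost_brackets_alt (text : String) : Option String :=
  match fbw_go 0 text.toList [] none with
  | none => none
  | some (s, e) => some (PySem.Str.slice text (some (s : Int)) (some ((e : Int) + 1)))

-- ===== PRECONDITION & SPEC =====
def Spec_find_rightmost_brackets (text : String) (out : Option String) : Prop := out = find_rightmost_brackets_alt text
instance (text : String) (out : Option String) : Decidable (Spec_find_rightmost_brackets text out) := by unfold Spec_find_rightmost_brackets; infer_instance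

-- ===== CLAIM (what is proved, stated in full; the proofs are below) =====
def Claim_equal_find_rightmost_brackets : Prop := ∀ (text : String), Dom_find_rightmost_brackets text → Spec_find_rightmost_brackets text (find_rightmost_brackets text)

-- ===== LEMMAS AND PROOFS =====

-- proof-side helper: backward depth scan, the common characterization both ports are reduced to.
-- Scanning down from index i with the running count depth of '}' minus '{' seen in (i, e]:
-- returns text[j : e+1] for the largest j with text[j] = '{' balancing the '}' at e, else none.
def fb_go (s : String) (e : Nat) (depth : Int) (i : Nat) : Option String :=
  let c := s.toList.getD i ' '
  let depth' := if c = '}' then depth + 1 else if c = '{' then depth - 1 else depth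
  if c = '{' ∧ depth' = 0 then
    some (PySem.Str.slice s (some (i : Int)) (some ((e : Int) + 1)))
  else
    match i with
    | 0 => none
    | Nat.succ j => fb_go s e depth' j

def fbBased (text : String) : Option String :=
  let e := PySem.Str.rfind text "}"
  if e = -1 then none
  else fb_go text e.toNat 0 e.toNat

-- ['}'] is a prefix of xs exactly when xs starts with '}'
lemma prefix_single (xs : List Char) : (['}'].isPrefixOf xs = true) ↔ xs[0]? = some '}' := by
  cases xs with
  | nil => decide
  | cons y ys =>
    rw [List.isPrefixOf_iff_prefix]
    simp [List.cons_prefix_iff]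

-- characterization of rfind.go for the one-char pattern ['}']
lemma rfind_go_cases (tl : List Char) (k : Nat) :
    (PySem.Chars.rfind.go tl ['}'] k = -1 ∧ ∀ j, j ≤ k → tl[j]? ≠ some '}')
  ∨ (∃ e, e ≤ k ∧ PySem.Chars.rfind.go tl ['}'] k = (e : Int) ∧ tl[e]? = some '}'
        ∧ ∀ j, e < j → j ≤ k → tl[j]? ≠ some '}') := by
  induction k with
  | zero =>
    by_cases h : ['}'].isPrefixOf tl = true
    · right
      exact ⟨0, le_refl _, by simp [PySem.Chars.rfind.go, h], (prefix_single tl).1 h,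
        fun j h1 h2 => absurd (Nat.lt_of_lt_of_le h1 h2) (lt_irrefl 0)⟩
    · left
      refine ⟨by simp [PySem.Chars.rfind.go, h], fun j hj => ?_⟩
      interval_cases j
      exact fun hc => h ((prefix_single tl).2 hc)
  | succ j ih =>
    have hd : (['}'].isPrefixOf (tl.drop (j+1)) = true) ↔ tl[j+1]? = some '}' := by
      rw [prefix_single, List.getElem?_drop]
    by_cases h : ['}'].isPrefixOf (tl.drop (j+1)) = true
    · right
      exact ⟨j+1, le_refl _, by simp [PySem.Chars.rfind.go, h], hd.1 h,
        fun m h1 h2 => absurd (Nat.lt_of_lt_of_le h1 h2) (lt_irrefl _)⟩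
    · have hnot : tl[j+1]? ≠ some '}' := fun hc => h (hd.2 hc)
      have hgo : PySem.Chars.rfind.go tl ['}'] (j+1) = PySem.Chars.rfind.go tl ['}'] j := by
        simp [PySem.Chars.rfind.go, h]
      rcases ih with ⟨h1, h2⟩ | ⟨e, he1, he2, he3, he4⟩
      · left
        refine ⟨hgo ▸ h1, fun m hm => ?_⟩
        rcases Nat.lt_or_ge m (j+1) with hlt | hge
        · exact h2 m (Nat.lt_succ_iff.1 hlt)
        · have : m = j+1 := le_antisymm hm hge
          rwa [this]
      · right
        refine ⟨e, Nat.le_succ_of_le he1, hgo ▸ he2, he3, fun m h1 h2 => ?_⟩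
        rcases Nat.lt_or_ge m (j+1) with hlt | hge
        · exact he4 m h1 (Nat.lt_succ_iff.1 hlt)
        · have : m = j+1 := le_antisymm h2 hge
          rwa [this]

-- if the remaining reversed input has no '}' and the stack is empty, A returns none
lemma fa_none (s : String) (n : Int) :
    ∀ (rev : List Char), (∀ c ∈ rev, c ≠ '}') → ∀ i, fa_go s n i rev [] = none := by
  intro rev
  induction rev with
  | nil => intro _ i; simp [fa_go]
  | cons c rest ih =>
    intro h i
    have hc : c ≠ '}' := h c (by simp)
    rw [fa_go, if_neg hc, if_neg (by simp)]
    exact ih (fun d hd => h d (by simp [hd])) (i + 1)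

-- with an empty stack, a '}'-free prefix of the reversed input is skipped
lemma fa_skip (s : String) (n : Int) :
    ∀ (pre rest : List Char), (∀ c ∈ pre, c ≠ '}') → ∀ i,
      fa_go s n i (pre ++ rest) [] = fa_go s n (i + pre.length) rest [] := by
  intro pre
  induction pre with
  | nil => intro rest _ i; simp
  | cons c pre' ih =>
    intro rest h i
    have hc : c ≠ '}' := h c (by simp)
    rw [List.cons_append, fa_go, if_neg hc, if_neg (by simp)]
    rw [ih rest (fun d hd => h d (by simp [hd])) (i + 1)]
    congr 1
    simp
    omega

lemma take_rev (L : List Char) (p : Nat) (hp : p < L.length) :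
    (L.take (p+1)).reverse = L[p] :: (L.take p).reverse := by
  rw [List.take_add_one, List.getElem?_eq_getElem hp]
  simp

lemma getD_eq (L : List Char) (p : Nat) (hp : p < L.length) : L.getD p ' ' = L[p] := by
  simp [List.getD_eq_getElem?_getD, List.getElem?_eq_getElem hp]

-- main backward simulation: below the rightmost '}' the A-stack's length is fb's depth and its bottom is e
lemma phase2 (s : String) (n : Int) (hn : n = (s.toList.length : Int)) (e : Nat)
    (he : s.toList[e]? = some '}') :
    ∀ p, p ≤ e → ∀ (stack : List Int) (depth : Int),
      ((stack ≠ [] ∧ stack.getLast? = some (e : Int) ∧ depth = stack.length)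
        ∨ (stack = [] ∧ depth = 0 ∧ p = e)) →
      fa_go s n (s.toList.length - 1 - p) (s.toList.take (p + 1)).reverse stack = fb_go s e depth p := by
  have heN : e < s.toList.length := by
    by_contra h
    rw [List.getElem?_eq_none (by omega)] at he
    simp at he
  intro p
  induction p with
  | zero =>
    intro hpe stack depth hinv
    have h0N : 0 < s.toList.length := by omega
    rw [take_rev _ 0 h0N, fb_go]
    simp only [getD_eq _ 0 h0N]
    rcases hinv with ⟨hne, hlast, hdep⟩ | ⟨hst, hdep, hpe0⟩
    · by_cases hc1 : s.toList[0] = '}'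
      · rw [fa_go, if_pos hc1, if_pos hc1]
        simp [fa_go, hc1]
      · by_cases hc2 : s.toList[0] = '{'
        · obtain ⟨x, st', rfl⟩ : ∃ x st', stack = x :: st' := by
            cases stack with
            | nil => exact absurd rfl hne
            | cons a l => exact ⟨a, l, rfl⟩
          rw [fa_go, if_neg hc1, if_pos ⟨hc2, hne⟩]
          simp only [List.headD_cons, List.tail_cons]
          by_cases hst' : st' = []
          · subst hst'
            simp only [List.getLast?_singleton, Option.some_inj] at hlast
            simp only [List.length_cons, List.length_nil] at hdep
            rw [if_pos rfl, if_neg hc1,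
              if_pos (show _ ∧ _ from ⟨hc2, by rw [if_pos hc2]; omega⟩)]
            rw [hlast]
            congr 3
            omega
          · rw [if_neg hst']
            have hd' : depth - 1 = (st'.length : Int) := by simp [hdep]
            have : ¬ (s.toList[0] = '{' ∧ (if s.toList[0] = '}' then depth + 1 else if s.toList[0] = '{' then depth - 1 else depth) = 0) := by
              rw [if_neg hc1, if_pos hc2]
              rintro ⟨-, h0⟩
              rw [hd'] at h0
              have : 0 < st'.length := List.length_pos_iff.2 hst'
              omega
            rw [if_neg this]
            simp [fa_go]
        · rw [fa_go, if_neg hc1, if_neg (by rintro ⟨h, -⟩; exact hc2 h)]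
          rw [if_neg (by rintro ⟨h, -⟩; exact hc2 h)]
          simp [fa_go]
    · subst hst hdep
      have he0 : s.toList[0] = '}' := by
        have := List.getElem?_eq_getElem h0N
        rw [← hpe0] at he
        rw [he] at this
        exact (Option.some_inj.1 this.symm)
      rw [fa_go, if_pos he0, if_pos he0]
      simp [fa_go, he0]
  | succ p ih =>
    intro hpe stack depth hinv
    have hpN : p + 1 < s.toList.length := by omega
    have hi : s.toList.length - 1 - p = s.toList.length - 1 - (p+1) + 1 := by omega
    rw [take_rev _ (p+1) hpN, fb_go]
    simp only [getD_eq _ (p+1) hpN]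
    rcases hinv with ⟨hne, hlast, hdep⟩ | ⟨hst, hdep, hpe1⟩
    · by_cases hc1 : s.toList[p+1] = '}'
      · rw [fa_go, if_pos hc1, if_pos hc1]
        rw [if_neg (by rintro ⟨h, -⟩; rw [h] at hc1; exact absurd hc1 (by decide))]
        rw [← hi]
        have hpush : n - ((s.toList.length - 1 - (p+1) : Nat) : Int) - 1 = ((p+1 : Nat) : Int) := by omega
        rw [hpush]
        refine ih (by omega) _ _ (Or.inl ⟨by simp, ?_, by simp [hdep]⟩)
        cases stack with
        | nil => exact absurd rfl hne
        | cons a l => rw [List.getLast?_cons_cons]; exact hlast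
      · by_cases hc2 : s.toList[p+1] = '{'
        · obtain ⟨x, st', rfl⟩ : ∃ x st', stack = x :: st' := by
            cases stack with
            | nil => exact absurd rfl hne
            | cons a l => exact ⟨a, l, rfl⟩
          rw [fa_go, if_neg hc1, if_pos ⟨hc2, hne⟩]
          simp only [List.headD_cons, List.tail_cons]
          by_cases hst' : st' = []
          · subst hst'
            simp only [List.getLast?_singleton, Option.some_inj] at hlast
            simp only [List.length_cons, List.length_nil] at hdep
            rw [if_pos rfl, if_neg hc1,
              if_pos (show _ ∧ _ from ⟨hc2, by rw [if_pos hc2]; omega⟩)]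
            rw [hlast]
            congr 3
            omega
          · rw [if_neg hst']
            have hd' : depth - 1 = (st'.length : Int) := by simp [hdep]
            rw [if_neg (by
              rw [if_neg hc1, if_pos hc2]
              rintro ⟨-, h0⟩
              rw [hd'] at h0
              have : 0 < st'.length := List.length_pos_iff.2 hst'
              omega)]
            rw [← hi, if_neg hc1, if_pos hc2]
            refine ih (by omega) _ _ (Or.inl ⟨hst', ?_, hd'⟩)
            cases st' with
            | nil => exact absurd rfl hst'
            | cons a l => rw [← List.getLast?_cons_cons (a := x)]; exact hlast
        · rw [fa_go, if_neg hc1, if_neg (by rintro ⟨h, -⟩; exact hc2 h)]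
          rw [if_neg (by rintro ⟨h, -⟩; exact hc2 h), if_neg hc1, if_neg hc2]
          rw [← hi]
          exact ih (by omega) _ _ (Or.inl ⟨hne, hlast, hdep⟩)
    · subst hst hdep
      have hc1 : s.toList[p+1] = '}' := by
        have := List.getElem?_eq_getElem hpN
        rw [← hpe1] at he
        rw [he] at this
        exact (Option.some_inj.1 this.symm)
      rw [fa_go, if_pos hc1, if_pos hc1]
      rw [if_neg (by rintro ⟨h, -⟩; rw [h] at hc1; exact absurd hc1 (by decide))]
      rw [← hi]
      have hpush : n - ((s.toList.length - 1 - (p+1) : Nat) : Int) - 1 = ((e : Nat) : Int) := by omega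
      rw [hpush]
      exact ih (by omega) _ _ (Or.inl ⟨by simp, by simp, by simp⟩)

-- A equals the backward characterization
lemma A_eq_fbBased (text : String) : find_rightmost_brackets text = fbBased text := by
  have hlen : PySem.Str.len text = (text.toList.length : Int) := by
    simp [PySem.Str.len]
  have hrfind : PySem.Str.rfind text "}" =
      PySem.Chars.rfind.go text.toList ['}'] text.toList.length := by
    rw [PySem.Str.rfind_eq]
    rfl
  rcases rfind_go_cases text.toList text.toList.length with ⟨h1, h2⟩ | ⟨e, he1, he2, he3, he4⟩
  · rw [find_rightmost_brackets, fbBased]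
    simp only [hrfind, h1, if_true]
    apply fa_none
    intro c hc
    rw [List.mem_reverse] at hc
    obtain ⟨j, hj, rfl⟩ := List.mem_iff_getElem.1 hc
    intro hcj
    exact h2 j (le_of_lt hj) (by rw [List.getElem?_eq_getElem hj, hcj])
  · have heN : e < text.toList.length := by
      by_contra h
      rw [List.getElem?_eq_none (by omega)] at he3
      simp at he3
    rw [find_rightmost_brackets, fbBased]
    simp only [hrfind, he2]
    rw [if_neg (by omega), Int.toNat_natCast]
    have hsplit : text.toList.reverse
        = (text.toList.drop (e+1)).reverse ++ (text.toList.take (e+1)).reverse := by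
      rw [← List.reverse_append, List.take_append_drop]
    rw [hsplit]
    rw [fa_skip text _ _ _ (by
      intro c hc
      rw [List.mem_reverse] at hc
      obtain ⟨j, hj, rfl⟩ := List.mem_iff_getElem.1 hc
      intro hcj
      have hjl : e + 1 + j < text.toList.length := by
        rw [List.length_drop] at hj
        omega
      rw [List.getElem_drop] at hcj
      exact he4 (e + 1 + j) (by omega) (by omega)
        (by rw [List.getElem?_eq_getElem hjl, hcj]) ) 0]
    have hlen2 : 0 + (text.toList.drop (e+1)).reverse.length = text.toList.length - 1 - e := by
      rw [List.length_reverse, List.length_drop]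
      omega
    rw [hlen2]
    exact phase2 text _ hlen e he3 e (le_refl e) [] 0 (Or.inr ⟨rfl, rfl, rfl⟩)

-- ===== forward-scan machinery =====

-- net '{' minus '}' in L[i : k)
def ddf (L : List Char) (i k : Nat) : Int :=
  (((L.take k).drop i).count '{' : Int) - (((L.take k).drop i).count '}' : Int)

lemma ddf_ge (L : List Char) (i k : Nat) (h : k ≤ i) : ddf L i k = 0 := by
  have : (L.take k).drop i = [] := by
    apply List.drop_eq_nil_of_le
    exact le_trans (List.length_take_le _ _) h
  simp [ddf, this]

lemma ddf_step (L : List Char) (i k : Nat) (hi : i ≤ k) (hk : k < L.length) :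
    ddf L i (k+1) = ddf L i k +
      (if L[k] = '{' then 1 else if L[k] = '}' then -1 else 0) := by
  have h1 : L.take (k+1) = L.take k ++ [L[k]] := by
    rw [List.take_add_one, List.getElem?_eq_getElem hk]
    rfl
  have h2 : (L.take (k+1)).drop i = (L.take k).drop i ++ [L[k]] := by
    rw [h1, List.drop_append_of_le_length (by simp; omega)]
  rw [ddf, ddf, h2]
  by_cases c1 : L[k] = '{'
  · simp [List.count_append, c1]
    push_cast
    omega
  · by_cases c2 : L[k] = '}'
    · simp [List.count_append, c1, c2]
      push_cast
      omega
    · simp [List.count_append, c1, c2]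

-- forward-stack invariant: entries are unmatched '{' positions, head largest; ddf is dominated
-- by the number of stack entries in [i, k), with equality at each entry
def INVf (L : List Char) (k : Nat) (opens : List Nat) : Prop :=
  (∀ a ∈ opens, a < k ∧ L[a]? = some '{') ∧
  List.Pairwise (fun a b => b < a) opens ∧
  (∀ i, i ≤ k → ddf L i k ≤ (opens.countP (fun b => decide (i ≤ b)) : Int)) ∧
  (∀ a ∈ opens, ddf L a k = (opens.countP (fun b => decide (a ≤ b)) : Int))

lemma invf_zero (L : List Char) : INVf L 0 [] := by
  refine ⟨by simp, by simp, ?_, by simp⟩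
  intro i hi
  interval_cases i
  simp [ddf]

lemma invf_open (L : List Char) (k : Nat) (opens : List Nat) (hk : k < L.length)
    (hc : L[k] = '{') (h : INVf L k opens) : INVf L (k+1) (k :: opens) := by
  obtain ⟨h1, h2, h3, h4⟩ := h
  have hstep : ∀ i, i ≤ k → ddf L i (k+1) = ddf L i k + 1 := by
    intro i hi
    rw [ddf_step L i k hi hk, if_pos hc]
  refine ⟨?_, ?_, ?_, ?_⟩
  · intro a ha
    rcases List.mem_cons.1 ha with rfl | ha
    · exact ⟨by omega, by rw [List.getElem?_eq_getElem hk, hc]⟩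
    · exact ⟨by have := (h1 a ha).1; omega, (h1 a ha).2⟩
  · rw [List.pairwise_cons]
    exact ⟨fun b hb => (h1 b hb).1, h2⟩
  · intro i hi
    rcases Nat.lt_or_ge i (k+1) with hlt | hge
    · have hik : i ≤ k := by omega
      rw [hstep i hik, List.countP_cons, if_pos (by simp [hik])]
      have := h3 i hik
      push_cast
      omega
    · have : i = k + 1 := by omega
      subst this
      rw [ddf_ge L _ _ (le_refl _)]
      positivity
  · intro a ha
    rcases List.mem_cons.1 ha with rfl | ha
    · rw [hstep a (le_refl _), ddf_ge L _ _ (le_refl _), List.countP_cons,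
        if_pos (by simp)]
      have : opens.countP (fun b => decide (a ≤ b)) = 0 := by
        apply List.countP_eq_zero.mpr
        intro b hb
        simp
        exact (h1 b hb).1
      rw [this]
      simp
    · have hak : a ≤ k := le_of_lt (h1 a ha).1
      rw [hstep a hak, h4 a ha, List.countP_cons, if_pos (by simp [hak])]
      push_cast
      ring

lemma invf_close_nil (L : List Char) (k : Nat) (hk : k < L.length)
    (hc : L[k] = '}') (h : INVf L k []) : INVf L (k+1) [] := by
  obtain ⟨-, -, h3, -⟩ := h
  refine ⟨by simp, by simp, ?_, by simp⟩
  intro i hi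
  rcases Nat.lt_or_ge i (k+1) with hlt | hge
  · have hik : i ≤ k := by omega
    rw [ddf_step L i k hik hk, if_neg (by rw [hc]; decide), if_pos hc]
    have := h3 i hik
    simp at this ⊢
    omega
  · have : i = k + 1 := by omega
    subst this
    rw [ddf_ge L _ _ (le_refl _)]
    simp

lemma invf_close_cons (L : List Char) (k : Nat) (a : Nat) (rest : List Nat) (hk : k < L.length)
    (hc : L[k] = '}') (h : INVf L k (a :: rest)) : INVf L (k+1) rest := by
  obtain ⟨h1, h2, h3, h4⟩ := h
  have hmax : ∀ b ∈ rest, b < a := (List.pairwise_cons.1 h2).1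
  have hstep : ∀ i, i ≤ k → ddf L i (k+1) = ddf L i k - 1 := by
    intro i hi
    rw [ddf_step L i k hi hk, if_neg (by rw [hc]; decide), if_pos hc]
    ring
  refine ⟨fun b hb => ⟨by have := (h1 b (by simp [hb])).1; omega, (h1 b (by simp [hb])).2⟩,
    (List.pairwise_cons.1 h2).2, ?_, ?_⟩
  · intro i hi
    rcases Nat.lt_or_ge i (k+1) with hlt | hge
    · have hik : i ≤ k := by omega
      rw [hstep i hik]
      rcases Nat.lt_or_ge a i with hia | hia
      swap
      · have := h3 i hik
        rw [List.countP_cons, if_pos (by simp [hia])] at this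
        push_cast at this ⊢
        omega
      · have hz : rest.countP (fun b => decide (i ≤ b)) = 0 := by
          apply List.countP_eq_zero.mpr
          intro b hb
          simp
          have := hmax b hb
          omega
        have hz2 : (a :: rest).countP (fun b => decide (i ≤ b)) = 0 := by
          rw [List.countP_cons, if_neg (by simp; omega), hz]
        have := h3 i hik
        rw [hz2] at this
        rw [hz]
        simp at this ⊢
        omega
    · have : i = k + 1 := by omega
      subst this
      rw [ddf_ge L _ _ (le_refl _)]
      positivity
  · intro b hb
    have hba : b ≤ a := le_of_lt (hmax b hb)
    have hbk : b ≤ k := le_of_lt (h1 b (by simp [hb])).1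
    rw [hstep b hbk, h4 b (by simp [hb]), List.countP_cons, if_pos (by simp [hba])]
    push_cast
    ring

lemma invf_other (L : List Char) (k : Nat) (opens : List Nat) (hk : k < L.length)
    (hc1 : L[k] ≠ '{') (hc2 : L[k] ≠ '}') (h : INVf L k opens) : INVf L (k+1) opens := by
  obtain ⟨h1, h2, h3, h4⟩ := h
  have hstep : ∀ i, i ≤ k → ddf L i (k+1) = ddf L i k := by
    intro i hi
    rw [ddf_step L i k hi hk, if_neg hc1, if_neg hc2]
    ring
  refine ⟨fun a ha => ⟨by have := (h1 a ha).1; omega, (h1 a ha).2⟩, h2, ?_, ?_⟩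
  · intro i hi
    rcases Nat.lt_or_ge i (k+1) with hlt | hge
    · have hik : i ≤ k := by omega
      rw [hstep i hik]
      exact h3 i hik
    · have : i = k + 1 := by omega
      subst this
      rw [ddf_ge L _ _ (le_refl _)]
      positivity
  · intro a ha
    rw [hstep a (le_of_lt (h1 a ha).1)]
    exact h4 a ha

-- the depth value fb_go carries, expressed by counts: '}' minus '{' in L[i : e+1)
def eef (L : List Char) (i e : Nat) : Int :=
  (((L.take (e+1)).drop i).count '}' : Int) - (((L.take (e+1)).drop i).count '{' : Int)

lemma eef_step (L : List Char) (i e : Nat) (hi : i ≤ e) (he : e < L.length) :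
    eef L i e = eef L (i+1) e +
      (if L[i] = '}' then 1 else if L[i] = '{' then -1 else 0) := by
  have hlen : i < (L.take (e+1)).length := by
    rw [List.length_take]
    omega
  have h2 : (L.take (e+1)).drop i = L[i] :: (L.take (e+1)).drop (i+1) := by
    rw [List.drop_eq_getElem_cons hlen]
    congr 1
    exact List.getElem_take
  rw [eef, eef, h2]
  by_cases c1 : L[i] = '}'
  · simp [List.count_cons, c1]
    push_cast
    omega
  · by_cases c2 : L[i] = '{'
    · simp [List.count_cons, c1, c2]
      push_cast
      omega
    · simp [List.count_cons, c1, c2]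

lemma eef_self (L : List Char) (e : Nat) : eef L (e+1) e = 0 := by
  have : (L.take (e+1)).drop (e+1) = [] := by
    apply List.drop_eq_nil_of_le
    exact List.length_take_le _ _
  simp [eef, this]

lemma eef_eq_ddf (L : List Char) (i e : Nat) (hi : i ≤ e) (he : e < L.length)
    (hc : L[e] = '}') : eef L i e = 1 - ddf L i e := by
  have h1 : L.take (e+1) = L.take e ++ [L[e]] := by
    rw [List.take_add_one, List.getElem?_eq_getElem he]
    rfl
  have h2 : (L.take (e+1)).drop i = (L.take e).drop i ++ [L[e]] := by
    rw [h1, List.drop_append_of_le_length (by simp; omega)]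
  rw [eef, ddf, h2, hc]
  simp [List.count_append]
  push_cast
  ring

-- fb_go finds nothing when no index below i satisfies the return condition
lemma fb_go_none (s : String) (e : Nat) (he : e < s.toList.length) :
    ∀ i, i ≤ e → ∀ depth, depth = eef s.toList (i+1) e →
      (∀ j, j ≤ i → ¬(s.toList.getD j ' ' = '{' ∧ eef s.toList j e = 0)) →
      fb_go s e depth i = none := by
  intro i
  induction i with
  | zero =>
    intro hie depth hdep hnone
    have h0 : (0:Nat) < s.toList.length := by omega
    have hn0 := hnone 0 (le_refl _)
    rw [getD_eq _ 0 h0] at hn0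
    rw [fb_go]
    simp only [getD_eq _ 0 h0]
    rw [if_neg]
    rintro ⟨hc, hd⟩
    rw [if_neg (by rw [hc]; decide), if_pos hc, hdep] at hd
    have hst := eef_step s.toList 0 e (Nat.zero_le e) he
    rw [if_neg (by rw [hc]; decide), if_pos hc] at hst
    exact hn0 ⟨hc, by omega⟩
  | succ j ih =>
    intro hie depth hdep hnone
    have hj : j + 1 < s.toList.length := by omega
    have hn1 := hnone (j+1) (le_refl _)
    rw [getD_eq _ (j+1) hj] at hn1
    rw [fb_go]
    simp only [getD_eq _ (j+1) hj]
    have hd' : (if s.toList[j+1] = '}' then depth + 1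
        else if s.toList[j+1] = '{' then depth - 1 else depth) = eef s.toList (j+1) e := by
      rw [hdep, eef_step s.toList (j+1) e hie he]
      by_cases c1 : s.toList[j+1] = '}'
      · rw [if_pos c1, if_pos c1]
      · by_cases c2 : s.toList[j+1] = '{'
        · rw [if_neg c1, if_pos c2, if_neg c1, if_pos c2]
          ring
        · rw [if_neg c1, if_neg c2, if_neg c1, if_neg c2]
          ring
    rw [if_neg]
    · rw [hd']
      exact ih (by omega) _ rfl (fun m hm => hnone m (by omega))
    · rw [hd']
      rintro ⟨hc, h0⟩
      exact hn1 ⟨hc, h0⟩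

-- fb_go returns the slice at the largest satisfying index a
lemma fb_go_finds (s : String) (e : Nat) (he : e < s.toList.length) (a : Nat)
    (ha : s.toList.getD a ' ' = '{') (haz : eef s.toList a e = 0) :
    ∀ i, a ≤ i → i ≤ e → ∀ depth, depth = eef s.toList (i+1) e →
      (∀ j, a < j → j ≤ i → ¬(s.toList.getD j ' ' = '{' ∧ eef s.toList j e = 0)) →
      fb_go s e depth i = some (PySem.Str.slice s (some (a : Int)) (some ((e : Int) + 1))) := by
  intro i
  induction i with
  | zero =>
    intro hai hie depth hdep hnone
    have h0 : (0:Nat) < s.toList.length := by omega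
    have ha0 : a = 0 := by omega
    subst ha0
    rw [getD_eq _ 0 h0] at ha
    rw [fb_go]
    simp only [getD_eq _ 0 h0]
    rw [if_pos]
    refine ⟨ha, ?_⟩
    have hst := eef_step s.toList 0 e (Nat.zero_le e) he
    rw [if_neg (by rw [ha]; decide), if_pos ha] at hst
    rw [if_neg (by rw [ha]; decide), if_pos ha, hdep]
    omega
  | succ j ih =>
    intro hai hie depth hdep hnone
    have hj : j + 1 < s.toList.length := by omega
    rw [fb_go]
    simp only [getD_eq _ (j+1) hj]
    have hd' : (if s.toList[j+1] = '}' then depth + 1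
        else if s.toList[j+1] = '{' then depth - 1 else depth) = eef s.toList (j+1) e := by
      rw [hdep, eef_step s.toList (j+1) e hie he]
      by_cases c1 : s.toList[j+1] = '}'
      · rw [if_pos c1, if_pos c1]
      · by_cases c2 : s.toList[j+1] = '{'
        · rw [if_neg c1, if_pos c2, if_neg c1, if_pos c2]
          ring
        · rw [if_neg c1, if_neg c2, if_neg c1, if_neg c2]
          ring
    rcases Nat.lt_or_ge a (j+1) with hlt | hge
    · have hn1 := hnone (j+1) hlt (le_refl _)
      rw [getD_eq _ (j+1) hj] at hn1
      rw [if_neg]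
      · rw [hd']
        exact ih (by omega) (by omega) _ rfl (fun m h1 h2 => hnone m h1 (by omega))
      · rw [hd']
        rintro ⟨hc, h0⟩
        exact hn1 ⟨hc, h0⟩
    · have haj : a = j + 1 := by omega
      subst haj
      rw [getD_eq _ (j+1) hj] at ha
      rw [if_pos]
      exact ⟨ha, by rw [hd', haz]⟩

-- KEY: at a '}' at position k, the forward stack's head is exactly fb_go's answer for e = k
lemma key_nil (s : String) (k : Nat) (hk : k < s.toList.length)
    (hc : s.toList[k] = '}') (h : INVf s.toList k []) : fb_go s k 0 k = none := by
  obtain ⟨-, -, h3, -⟩ := h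
  apply fb_go_none s k hk k (le_refl _) 0 (eef_self s.toList k).symm
  intro j hj
  rintro ⟨-, hz⟩
  rw [eef_eq_ddf s.toList j k hj hk hc] at hz
  have := h3 j hj
  simp at this
  omega

lemma key_cons (s : String) (k : Nat) (a : Nat) (rest : List Nat) (hk : k < s.toList.length)
    (hc : s.toList[k] = '}') (h : INVf s.toList k (a :: rest)) :
    fb_go s k 0 k = some (PySem.Str.slice s (some (a : Int)) (some ((k : Int) + 1))) := by
  obtain ⟨h1, h2, h3, h4⟩ := h
  have hmax : ∀ b ∈ rest, b < a := (List.pairwise_cons.1 h2).1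
  have hak : a < k := (h1 a (by simp)).1
  have haL : s.toList[a] = '{' := by
    have := (h1 a (by simp)).2
    rw [List.getElem?_eq_getElem (by omega)] at this
    exact Option.some_inj.1 this
  have hcnt : ((a :: rest).countP (fun b => decide (a ≤ b)) : Int) = 1 := by
    rw [List.countP_cons, if_pos (by simp)]
    have : rest.countP (fun b => decide (a ≤ b)) = 0 := by
      apply List.countP_eq_zero.mpr
      intro b hb
      simp
      have := hmax b hb
      omega
    rw [this]
    simp
  have haz : eef s.toList a k = 0 := by
    rw [eef_eq_ddf s.toList a k (le_of_lt hak) hk hc, h4 a (by simp), hcnt]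
    ring
  apply fb_go_finds s k hk a (by rw [getD_eq _ a (by omega)]; exact haL) haz
    k (le_of_lt hak) (le_refl _) 0 (eef_self s.toList k).symm
  intro j hja hjk
  rintro ⟨-, hz⟩
  rw [eef_eq_ddf s.toList j k hjk hk hc] at hz
  have hzz : ((a :: rest).countP (fun b => decide (j ≤ b)) : Int) = 0 := by
    rw [List.countP_cons, if_neg (by simp; omega)]
    have : rest.countP (fun b => decide (j ≤ b)) = 0 := by
      apply List.countP_eq_zero.mpr
      intro b hb
      simp
      have := hmax b hb
      omega
    rw [this]
    simp
  have := h3 j hjk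
  rw [hzz] at this
  omega

-- rightmost '}' strictly below k
def lastClose (L : List Char) : Nat → Option Nat
  | 0 => none
  | k+1 => if L[k]? = some '}' then some k else lastClose L k

lemma lastClose_none (L : List Char) : ∀ k, (∀ j, j < k → L[j]? ≠ some '}') →
    lastClose L k = none := by
  intro k
  induction k with
  | zero => intro _; rfl
  | succ j ih =>
    intro h
    rw [lastClose, if_neg (h j (by omega))]
    exact ih (fun m hm => h m (by omega))

lemma lastClose_some (L : List Char) (e : Nat) (he : L[e]? = some '}') :
    ∀ k, e < k → (∀ j, e < j → j < k → L[j]? ≠ some '}') → lastClose L k = some e := by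
  intro k
  induction k with
  | zero => omega
  | succ j ih =>
    intro hek h
    rcases Nat.lt_or_ge e j with hlt | hge
    · rw [lastClose, if_neg (h j hlt (by omega))]
      exact ih hlt (fun m h1 h2 => h m h1 (by omega))
    · have : e = j := by omega
      subst this
      rw [lastClose, if_pos he]

-- one-step unfolding of the forward scan
lemma fbw_go_cons (i : Nat) (c : Char) (rest : List Char) (opens : List Nat)
    (last : Option (Nat × Nat)) :
    fbw_go i (c :: rest) opens last =
      if c = '{' then fbw_go (i + 1) rest (i :: opens) last
      else if c = '}' then
        match opens with
        | [] => fbw_go (i + 1) rest [] none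
        | a :: os => fbw_go (i + 1) rest os (some (a, i))
      else fbw_go (i + 1) rest opens last := by
  rfl

-- the forward scan's accumulated last match maps to fb_go's answer for the rightmost '}' so far
def goodLast (s : String) (k : Nat) (last : Option (Nat × Nat)) : Prop :=
  last.map (fun p => PySem.Str.slice s (some (p.1 : Int)) (some ((p.2 : Int) + 1))) =
    match lastClose s.toList k with
    | none => none
    | some e => fb_go s e 0 e

-- main forward simulation
lemma fwd_main (s : String) : ∀ (cs : List Char) (k : Nat) (opens : List Nat)
    (last : Option (Nat × Nat)), cs = s.toList.drop k → k ≤ s.toList.length →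
    INVf s.toList k opens → goodLast s k last →
    (fbw_go k cs opens last).map
        (fun p => PySem.Str.slice s (some (p.1 : Int)) (some ((p.2 : Int) + 1))) =
      match lastClose s.toList s.toList.length with
      | none => none
      | some e => fb_go s e 0 e := by
  intro cs
  induction cs with
  | nil =>
    intro k opens last hcs hk hinv hgood
    have hkn : k = s.toList.length := by
      have := congrArg List.length hcs
      rw [List.length_nil, List.length_drop] at this
      omega
    rw [fbw_go, ← hkn]
    exact hgood
  | cons c rest ih =>
    intro k opens last hcs hk hinv hgood
    have hkn : k < s.toList.length := by
      by_contra h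
      rw [List.drop_eq_nil_of_le (by omega)] at hcs
      exact (List.cons_ne_nil c rest) hcs
    have h' : c :: rest = s.toList[k] :: s.toList.drop (k+1) :=
      hcs.trans (List.drop_eq_getElem_cons hkn)
    simp only [List.cons.injEq] at h'
    obtain ⟨hc, hrest⟩ := h'
    have hgetk : s.toList[k]? = some s.toList[k] := List.getElem?_eq_getElem hkn
    by_cases c1 : c = '{'
    · rw [fbw_go_cons, if_pos c1]
      apply ih (k+1) _ _ hrest (by omega)
        (invf_open s.toList k opens hkn (by rw [← hc]; exact c1) hinv)
      unfold goodLast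
      rw [lastClose, if_neg (by
        rw [hgetk]
        simp only [Option.some_inj]
        rw [← hc, c1]
        decide)]
      exact hgood
    · by_cases c2 : c = '}'
      · have hck2 : s.toList[k] = '}' := by rw [← hc]; exact c2
        rw [fbw_go_cons, if_neg c1, if_pos c2]
        cases opens with
        | nil =>
          apply ih (k+1) _ _ hrest (by omega) (invf_close_nil s.toList k hkn hck2 hinv)
          unfold goodLast
          rw [lastClose, if_pos (by rw [hgetk, hck2])]
          show Option.map (fun p : Nat × Nat =>
              PySem.Str.slice s (some (p.1 : Int)) (some ((p.2 : Int) + 1))) none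
            = fb_go s k 0 k
          rw [key_nil s k hkn hck2 hinv]
          rfl
        | cons a os =>
          apply ih (k+1) _ _ hrest (by omega) (invf_close_cons s.toList k a os hkn hck2 hinv)
          unfold goodLast
          rw [lastClose, if_pos (by rw [hgetk, hck2])]
          show Option.map (fun p : Nat × Nat =>
              PySem.Str.slice s (some (p.1 : Int)) (some ((p.2 : Int) + 1))) (some (a, k))
            = fb_go s k 0 k
          rw [key_cons s k a os hkn hck2 hinv]
          rfl
      · rw [fbw_go_cons, if_neg c1, if_neg c2]
        apply ih (k+1) _ _ hrest (by omega)
          (invf_other s.toList k opens hkn (by rw [← hc]; exact c1) (by rw [← hc]; exact c2) hinv)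
        unfold goodLast
        rw [lastClose, if_neg (by
          rw [hgetk]
          simp only [Option.some_inj]
          rw [← hc]
          exact c2)]
        exact hgood

-- B equals the backward characterization
lemma B_eq_fbBased (text : String) : find_rightmost_brackets_alt text = fbBased text := by
  have hmain := fwd_main text text.toList 0 [] none (by simp) (by omega)
    (invf_zero text.toList) (by unfold goodLast; rw [lastClose]; rfl)
  have hmap : find_rightmost_brackets_alt text = (fbw_go 0 text.toList [] none).map
      (fun p => PySem.Str.slice text (some (p.1 : Int)) (some ((p.2 : Int) + 1))) := by
    rw [find_rightmost_brackets_alt]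
    cases fbw_go 0 text.toList [] none with
    | none => rfl
    | some p => cases p; rfl
  rw [hmap, hmain]
  have hrfind : PySem.Str.rfind text "}" =
      PySem.Chars.rfind.go text.toList ['}'] text.toList.length := by
    rw [PySem.Str.rfind_eq]
    rfl
  rcases rfind_go_cases text.toList text.toList.length with ⟨h1, h2⟩ | ⟨e, he1, he2, he3, he4⟩
  · rw [lastClose_none text.toList _ (fun j hj => h2 j (by omega))]
    rw [fbBased]
    simp only [hrfind, h1, if_true]
  · have heN : e < text.toList.length := by
      by_contra h
      rw [List.getElem?_eq_none (by omega)] at he3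
      simp at he3
    rw [lastClose_some text.toList e he3 _ heN (fun j h1 h2 => he4 j h1 (by omega))]
    rw [fbBased]
    simp only [hrfind, he2]
    rw [if_neg (by omega), Int.toNat_natCast]

-- ===== VERDICT (by name: the statement is the Claim_ definition above) =====
theorem find_rightmost_brackets_spec : Claim_equal_find_rightmost_brackets := by
  intro text _
  show find_rightmost_brackets text = find_rightmost_brackets_alt text
  rw [A_eq_fbBased, B_eq_fbBased]
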